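-- pv_equiv track=rewrite | github.com/Dhebrank/factor_project_5 | scripts/_archive/phase4_individual_substep_tests.py | _calculate_runs
-- ===== SOURCE A (Python) =====
-- def _calculate_runs(regime_col, target_regime):
--     """Calculate consecutive runs of a specific regime"""
--     runs = []
--     current_run = 0
--     in_regime = False
--
--     for regime in regime_col:
--         if regime == target_regime:
--             if not in_regime:
--                 in_regime = True
--                 current_run = 1
--             else:
--                 current_run += 1
--         else:
--             if in_regime:
--                 runs.append(current_run)
--                 in_regime = False
--                 current_run = 0
--
--     # Handle final run
--     if in_regime:
--         runs.append(current_run)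
--
--     return runs
-- ===== SOURCE B (Python) =====
-- def _calculate_runs(regime_col, target_regime):
--     """Calculate consecutive runs of a specific regime"""
--     mask = [x == target_regime for x in regime_col]
--     n = len(mask)
--     starts = [i for i in range(n) if mask[i] and (i == 0 or not mask[i - 1])]
--     ends = [i for i in range(n) if mask[i] and (i == n - 1 or not mask[i + 1])]
--     return [e - s + 1 for s, e in zip(starts, ends)]
-- ===== Notes on version B (the rewrite author's own statement) =====
-- stated objective: alternative
-- what changed: Replaced A's single-pass in_regime/current_run state machine (with post-loop final-run flush) by boundary detection: build a membership mask, find run-start indices (true with no true before) and run-end indices (true with no true after), and return end-start+1 for each zipped (start,end) pair.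
import Mathlib
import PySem

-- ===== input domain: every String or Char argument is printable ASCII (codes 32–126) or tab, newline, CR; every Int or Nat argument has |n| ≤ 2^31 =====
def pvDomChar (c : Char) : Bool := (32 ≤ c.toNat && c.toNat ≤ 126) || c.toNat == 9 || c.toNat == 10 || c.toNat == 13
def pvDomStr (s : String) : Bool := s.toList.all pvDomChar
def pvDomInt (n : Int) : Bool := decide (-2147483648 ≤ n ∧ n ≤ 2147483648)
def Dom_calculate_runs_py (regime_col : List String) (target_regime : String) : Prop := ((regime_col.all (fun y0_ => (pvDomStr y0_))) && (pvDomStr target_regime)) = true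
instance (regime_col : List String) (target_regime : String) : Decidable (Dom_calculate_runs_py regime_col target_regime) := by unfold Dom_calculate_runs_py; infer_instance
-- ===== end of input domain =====

-- B replaces A's in_regime/current_run state machine by staged boundary detection: a membership
-- mask, run-start and run-end index lists, and end - start + 1 per zipped pair; objective: alternative.


-- ===== PORT A =====
-- State-machine loop of A: carries (runs, current_run, in_regime) through the list,
-- then the post-loop final-run handling.
def goA (t : String) : List String → List Int → Int → Bool → List Int
  | [], runs, cur, inR => if inR then runs ++ [cur] else runs
  | r :: rest, runs, cur, inR =>
    if r == t then
      if !inR then goA t rest runs 1 true else goA t rest runs (cur + 1) true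
    else
      if inR then goA t rest (runs ++ [cur]) 0 false else goA t rest runs cur false

def calculate_runs_py (regime_col : List String) (target_regime : String) : List Int :=
  goA target_regime regime_col [] 0 false

-- ===== PORT B =====
-- B: mask = [x == target for x in col]; starts = run-start indices, ends = run-end indices
-- (list comprehensions over range(n); the guarded mask[i-1]/mask[i+1] accesses are always in
-- range in Python, so getD is exact); result = [e - s + 1 for s, e in zip(starts, ends)].
def sCondB (m : List Bool) (i : Nat) : Bool :=
  m.getD i false && (decide (i = 0) || !(m.getD (i - 1) false))
def eCondB (m : List Bool) (i : Nat) : Bool :=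
  m.getD i false && (decide (i = m.length - 1) || !(m.getD (i + 1) false))
def startsOf (m : List Bool) : List Nat := (List.range m.length).filter (sCondB m)
def endsOf (m : List Bool) : List Nat := (List.range m.length).filter (eCondB m)
def runsOfMask (m : List Bool) : List Int :=
  ((startsOf m).zip (endsOf m)).map (fun p => (p.2 : Int) - (p.1 : Int) + 1)

def calculate_runs_py_alt (regime_col : List String) (target_regime : String) : List Int :=
  runsOfMask (regime_col.map (fun x => x == target_regime))

-- ===== PRECONDITION & SPEC =====
def Spec_calculate_runs_py (regime_col : List String) (target_regime : String) (out : List Int) : Prop := out = calculate_runs_py_alt regime_col target_regime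
instance (regime_col : List String) (target_regime : String) (out : List Int) : Decidable (Spec_calculate_runs_py regime_col target_regime out) := by unfold Spec_calculate_runs_py; infer_instance

-- ===== CLAIM (what is proved, stated in full; the proofs are below) =====
def Claim_equal_calculate_runs_py : Prop := ∀ (regime_col : List String) (target_regime : String), Dom_calculate_runs_py regime_col target_regime → Spec_calculate_runs_py regime_col target_regime (calculate_runs_py regime_col target_regime)

-- ===== LEMMAS AND PROOFS =====

-- proof-side reference function: run lengths of a boolean mask, by grouping
def grp : List Bool → List Int
  | [] => []
  | b :: m =>
    let k := m.takeWhile (fun y => y == b)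
    let r := m.dropWhile (fun y => y == b)
    if b then ((1 : Int) + k.length) :: grp r else grp r
termination_by m => m.length
decreasing_by all_goals simp only [List.length_cons]; all_goals exact Nat.lt_succ_of_le (List.length_dropWhile_le _ _)

theorem grp_false (m : List Bool) : grp (false :: m) = grp m := by
  cases m with
  | nil => simp [grp]
  | cons b m' =>
    cases b <;> simp [grp, List.dropWhile]

-- accumulator append lemma for A's loop
theorem goA_append (t : String) (l : List String) :
    ∀ (runs : List Int) (cur : Int) (inR : Bool),
      goA t l runs cur inR = runs ++ goA t l [] cur inR := by
  induction l with
  | nil => intro runs cur inR; cases inR <;> simp [goA]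
  | cons x xs ih =>
    intro runs cur inR
    cases inR with
    | false =>
      by_cases hx : (x == t) = true <;> simp [goA, hx] <;> exact ih ..
    | true =>
      by_cases hx : (x == t) = true
      · simp [goA, hx]; exact ih ..
      · simp [goA, hx]
        rw [ih (runs ++ [cur]) 0 false, ih [cur] 0 false]
        simp

-- A's loop in both states, against grp of the mask
theorem goA_eq (t : String) (l : List String) :
    (∀ cur : Int, goA t l [] cur false = grp (l.map (fun x => x == t))) ∧
    (∀ cur : Int,
      goA t l [] cur true =
        (cur + ((l.map (fun x => x == t)).takeWhile (fun y => y == true)).length) ::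
          grp ((l.map (fun x => x == t)).dropWhile (fun y => y == true))) := by
  induction l with
  | nil => constructor <;> intro cur <;> simp [goA, grp]
  | cons x xs ih =>
    constructor <;> intro cur
    · by_cases hx : (x == t) = true
      · simp only [goA, hx, if_true, Bool.not_false]
        rw [ih.2 1]
        simp [grp, hx]
      · simp [goA, hx]
        rw [ih.1 cur]
        simp [grp_false]
    · by_cases hx : (x == t) = true
      · simp only [goA, hx, if_true, Bool.not_true]
        rw [ih.2 (cur + 1)]
        simp [hx]
        ring
      · simp [goA, hx]
        rw [goA_append, ih.1 0]
        simp [grp_false]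

-- pointwise shift facts for the boundary conditions
theorem eCondB_succ (b : Bool) (m : List Bool) (i : Nat) :
    eCondB (b :: m) (i + 1) = eCondB m i := by
  cases m with
  | nil => simp [eCondB]
  | cons c m' =>
    simp only [eCondB, List.getD_cons_succ, List.length_cons, Nat.add_sub_cancel]
    congr 2
    exact decide_eq_decide.mpr (by omega)

theorem sCondB_false_succ (m : List Bool) (i : Nat) :
    sCondB (false :: m) (i + 1) = sCondB m i := by
  cases i with
  | zero => simp [sCondB]
  | succ j => simp [sCondB]

theorem sCondB_true_succ (m : List Bool) (i : Nat) :
    sCondB (true :: m) (i + 1) = (sCondB m i && !(decide (i = 0))) := by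
  cases i with
  | zero => simp [sCondB]
  | succ j => simp [sCondB]

theorem starts_false (m : List Bool) :
    startsOf (false :: m) = (startsOf m).map Nat.succ := by
  unfold startsOf
  rw [List.length_cons, List.range_succ_eq_map, List.filter_cons, List.filter_map]
  have h0 : sCondB (false :: m) 0 = false := by simp [sCondB]
  have hc : (sCondB (false :: m)) ∘ Nat.succ = sCondB m := by
    funext i; exact sCondB_false_succ m i
  simp [h0, hc]

theorem starts_true (m : List Bool) :
    startsOf (true :: m) =
      0 :: ((startsOf m).filter (fun i => !(decide (i = 0)))).map Nat.succ := by
  unfold startsOf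
  rw [List.length_cons, List.range_succ_eq_map, List.filter_cons, List.filter_map]
  have h0 : sCondB (true :: m) 0 = true := by simp [sCondB]
  have hc : (sCondB (true :: m)) ∘ Nat.succ = fun i => sCondB m i && !(decide (i = 0)) := by
    funext i; exact sCondB_true_succ m i
  rw [h0, hc]
  simp [List.filter_filter, Bool.and_comm]

theorem ends_cons (b : Bool) (m : List Bool) :
    endsOf (b :: m) =
      if b && (decide ((0 : Nat) = m.length) || !(m.getD 0 false)) then
        0 :: (endsOf m).map Nat.succ
      else (endsOf m).map Nat.succ := by
  unfold endsOf
  rw [List.length_cons, List.range_succ_eq_map, List.filter_cons, List.filter_map]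
  have h0 : eCondB (b :: m) 0 = (b && (decide ((0 : Nat) = m.length) || !(m.getD 0 false))) := by
    cases m <;> simp [eCondB]
  have hc : (eCondB (b :: m)) ∘ Nat.succ = eCondB m := by
    funext i; exact eCondB_succ b m i
  rw [h0, hc]

theorem no_zero_start (m : List Bool) (h : m.getD 0 false = false) :
    (startsOf m).filter (fun i => !(decide (i = 0))) = startsOf m := by
  apply List.filter_eq_self.mpr
  intro i hi
  have hs : sCondB m i = true := List.of_mem_filter hi
  have hne : i ≠ 0 := by
    intro h0; subst h0
    simp only [sCondB] at hs
    rw [h] at hs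
    simp at hs
  simp [hne]

theorem shift_zip (S E : List Nat) :
    ((S.map Nat.succ).zip (E.map Nat.succ)).map (fun p => (p.2 : Int) - (p.1 : Int) + 1) =
      (S.zip E).map (fun p => (p.2 : Int) - (p.1 : Int) + 1) := by
  rw [List.zip_map, List.map_map]
  congr 1
  funext p
  simp [Nat.succ_eq_add_one]

theorem grp_true_unfold (m : List Bool) :
    grp (true :: m) =
      ((1 : Int) + ((m.takeWhile (fun y => y == true)).length : Int)) ::
        grp (m.dropWhile (fun y => y == true)) := by
  simp [grp]

-- main: B's boundary computation equals run-grouping (fuel-indexed strong induction)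
theorem runs_eq_aux : ∀ (n : Nat) (m : List Bool), m.length ≤ n → runsOfMask m = grp m := by
  intro n
  induction n with
  | zero =>
    intro m h
    have : m = [] := List.eq_nil_of_length_eq_zero (Nat.le_zero.mp h)
    subst this
    simp [runsOfMask, startsOf, endsOf, grp]
  | succ n ih =>
    intro m h
    match m with
    | [] => simp [runsOfMask, startsOf, endsOf, grp]
    | false :: m' =>
      have hlen : m'.length ≤ n := by simp at h; omega
      rw [grp_false, ← ih m' hlen]
      unfold runsOfMask
      rw [starts_false, ends_cons]
      simp only [Bool.false_and, if_neg (by simp : ¬(false = true))]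
      exact shift_zip _ _
    | true :: m' =>
      have hlen : m'.length ≤ n := by simp at h; omega
      by_cases h0 : m'.getD 0 false = true
      · -- m' = true :: m''
        match m', h0 with
        | true :: m'', _ =>
          have hlen2 : (true :: m'').length ≤ n := hlen
          have hIH : runsOfMask (true :: m'') = grp (true :: m'') := ih _ hlen2
          obtain ⟨X, hX⟩ : ∃ X, startsOf (true :: m'') =
              0 :: X ∧ X = ((startsOf m'').filter (fun i => !(decide (i = 0)))).map Nat.succ := by
            exact ⟨_, starts_true m'', rfl⟩
          obtain ⟨hS1, hXdef⟩ := hX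
          have hXfilter : X.filter (fun i => !(decide (i = 0))) = X := by
            apply List.filter_eq_self.mpr
            intro i hi
            rw [hXdef] at hi
            obtain ⟨a, _, rfl⟩ := List.mem_map.mp hi
            simp
          -- endsOf (true :: m'') is nonempty
          have hgrp := grp_true_unfold m''
          have hne : startsOf (true :: m'') ≠ [] := by rw [hS1]; simp
          obtain ⟨e0, E', hE⟩ : ∃ e0 E', endsOf (true :: m'') = e0 :: E' := by
            cases hEc : endsOf (true :: m'') with
            | cons e0 E' => exact ⟨e0, E', rfl⟩
            | nil =>
              exfalso
              rw [runsOfMask, hEc, List.zip_nil_right] at hIH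
              rw [hgrp] at hIH
              simp at hIH
          -- decompose runsOfMask (true :: m'')
          rw [runsOfMask, hS1, hE] at hIH
          rw [hgrp] at hIH
          simp only [List.zip_cons_cons, List.map_cons, List.cons.injEq] at hIH
          obtain ⟨hhead, htail⟩ := hIH
          -- now the goal list true :: true :: m''
          rw [runsOfMask, starts_true, ends_cons]
          rw [hS1, List.filter_cons]
          simp only [decide_true, Bool.not_true, if_neg (by simp : ¬(false = true))]
          rw [hXfilter]
          have hcond : (true && (decide ((0:Nat) = (true :: m'').length) || !((true :: m'').getD 0 false))) = false := by
            simp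
          rw [hcond]
          simp only [if_neg (by simp : ¬(false = true))]
          rw [hE]
          simp only [List.map_cons, List.zip_cons_cons, List.map_cons]
          rw [shift_zip, htail]
          rw [grp_true_unfold (true :: m'')]
          have htw : (true :: m'').takeWhile (fun y => y == true) = true :: m''.takeWhile (fun y => y == true) := by
            simp [List.takeWhile]
          have hdw2 : (true :: m'').dropWhile (fun y => y == true) = m''.dropWhile (fun y => y == true) := by
            simp [List.dropWhile]
          rw [htw, hdw2]
          congr 1
          simp only [Nat.succ_eq_add_one, List.length_cons]
          push_cast
          push_cast at hhead
          omega
      · have h0' : m'.getD 0 false = false := by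
          cases hv : m'.getD 0 false
          · rfl
          · exact absurd hv h0
        have hcond : (true && (decide ((0:Nat) = m'.length) || !(m'.getD 0 false))) = true := by
          rw [h0']
          simp
        rw [runsOfMask, starts_true, no_zero_start m' h0', ends_cons, if_pos hcond]
        simp only [List.zip_cons_cons, List.map_cons]
        rw [shift_zip]
        rw [grp_true_unfold m']
        have htk : m'.takeWhile (fun y => y == true) = [] := by
          cases m' with
          | nil => rfl
          | cons c m'' =>
            have : c = false := by simpa using h0'
            subst this
            simp [List.takeWhile]
        have hdw : m'.dropWhile (fun y => y == true) = m' := by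
          cases m' with
          | nil => rfl
          | cons c m'' =>
            have : c = false := by simpa using h0'
            subst this
            simp [List.dropWhile]
        rw [htk, hdw]
        rw [← ih m' hlen]
        simp [runsOfMask]

theorem calculate_runs_py_spec : Claim_equal_calculate_runs_py := by
  intro l t _
  unfold Spec_calculate_runs_py calculate_runs_py calculate_runs_py_alt
  exact ((goA_eq t l).1 0).trans (runs_eq_aux _ _ le_rfl).symm
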